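-- pv_equiv track=rewrite | github.com/craiguffman/maga-christianism-project | creation/tool/script/opml-extractor.py | identify_figure
-- ===== SOURCE A (Python) =====
-- KEY_FIGURES = [
--     "Hooker, Richard",
--     "Hauerwas, Stanley",
--     "Barth, Karl",
--     "Augustine",
--     "Balthasar, Hans Urs von",
--     "Cary, Philip",
--     "Lake, Peter",
--     "Luther, Martin",
--     "McIntosh, Mark",
--     "Milbank, John",
--     "Ockham, William",
--     "Porter, Jean",
--     "Shuger, Debora",
--     "Tillich, Paul",
--     "Webster, John",
--     "Wells, Sam",
--     "Williams, Rowan",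
--     "Woodard-Lehman, Derek",
--     "Wright, N.T.",
--     "Zagzeski, Linda"
-- ]
--
-- NAME_VARIANTS = {
--     "Hooker, Richard": ["Richard Hooker", "Hooker", "Hooker Richard"],
--     "Hauerwas, Stanley": ["Stanley Hauerwas", "Hauerwas", "Hauerwas Stanley"],
--     "Barth, Karl": ["Karl Barth", "Barth", "Barth Karl"],
--     "Augustine": ["St. Augustine", "Saint Augustine", "Augustine of Hippo"],
--     "Balthasar, Hans Urs von": ["Hans Urs von Balthasar", "von Balthasar", "Balthasar", "Balthasar Hans Urs von"],
--     "Cary, Philip": ["Philip Cary", "Cary", "Cary Philip"],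
--     "Lake, Peter": ["Peter Lake", "Lake", "Lake Peter"],
--     "Luther, Martin": ["Martin Luther", "Luther", "Luther Martin"],
--     "McIntosh, Mark": ["Mark McIntosh", "McIntosh", "McIntosh Mark"],
--     "Milbank, John": ["John Milbank", "Milbank", "Milbank John"],
--     "Ockham, William": ["William Ockham", "William of Ockham", "Ockham", "Ockham William"],
--     "Porter, Jean": ["Jean Porter", "Porter", "Porter Jean"],
--     "Shuger, Debora": ["Debora Shuger", "Debora K. Shuger", "Shuger", "Shuger Debora"],
--     "Tillich, Paul": ["Paul Tillich", "Tillich", "Tillich Paul"],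
--     "Webster, John": ["John Webster", "Webster", "Webster John"],
--     "Wells, Sam": ["Samuel Wells", "Sam Wells", "Wells", "Wells Sam"],
--     "Williams, Rowan": ["Rowan Williams", "Williams", "Williams Rowan"],
--     "Woodard-Lehman, Derek": ["Derek Woodard-Lehman", "Woodard-Lehman", "Woodard-Lehman Derek"],
--     "Wright, N.T.": ["N.T. Wright", "N. T. Wright", "Nicholas Thomas Wright", "Tom Wright", "Wright", "Wright N.T."],
--     "Zagzeski, Linda": ["Linda Zagzeski", "Zagzeski", "Zagzeski Linda"]
-- }
--
-- def identify_figure_from_path(path):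
--     """
--     Identify which key figure a note belongs to based on its path/hierarchy
--     Returns the name of the figure or None if no match is found
--     """
--     path_lower = path.lower()
--
--     # Check each key figure and their variants in the path
--     for figure in KEY_FIGURES:
--         # Check the main name in the path
--         if figure.lower() in path_lower:
--             return figure
--
--         # Check name variants in the path
--         if figure in NAME_VARIANTS:
--             for variant in NAME_VARIANTS[figure]:
--                 if variant.lower() in path_lower:
--                     return figure
--
--     return None
--
-- def identify_figure(text, title, path):
--     """
--     Identify which key figure a note belongs to
--     First tries to identify from path/hierarchy, then falls back to content analysis
--     Returns the name of the figure or 'Other' if no match is found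
--     """
--     # First try to identify based on path/hierarchy
--     figure_from_path = identify_figure_from_path(path)
--     if figure_from_path:
--         return figure_from_path
--
--     # If path doesn't provide a clear figure, analyze content
--     # Combine title and the first few paragraphs of text for searching
--     search_text = f"{title} {text[:500]}".lower()
--
--     # Check each key figure and their variants
--     for figure in KEY_FIGURES:
--         # Check the main name
--         if figure.lower() in search_text:
--             return figure
--
--         # Check name variants
--         if figure in NAME_VARIANTS:
--             for variant in NAME_VARIANTS[figure]:
--                 if variant.lower() in search_text:
--                     return figure
--
--     return "Other"
-- ===== SOURCE B (Python) =====
-- # Keyword reduction: for every key figure, each of its name variants (and the main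
-- # "Surname, First" form) contains the figure's lowercased surname as a substring, and the
-- # bare surname is itself one of the listed variants.  Hence "some alias of figure F occurs
-- # in the haystack" is exactly equivalent to "F's surname occurs in the haystack", and the
-- # whole nested alias search collapses to a single 20-keyword scan per haystack.
-- _KEYWORDS = [
--     ("hooker", "Hooker, Richard"),
--     ("hauerwas", "Hauerwas, Stanley"),
--     ("barth", "Barth, Karl"),
--     ("augustine", "Augustine"),
--     ("balthasar", "Balthasar, Hans Urs von"),
--     ("cary", "Cary, Philip"),
--     ("lake", "Lake, Peter"),
--     ("luther", "Luther, Martin"),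
--     ("mcintosh", "McIntosh, Mark"),
--     ("milbank", "Milbank, John"),
--     ("ockham", "Ockham, William"),
--     ("porter", "Porter, Jean"),
--     ("shuger", "Shuger, Debora"),
--     ("tillich", "Tillich, Paul"),
--     ("webster", "Webster, John"),
--     ("wells", "Wells, Sam"),
--     ("williams", "Williams, Rowan"),
--     ("woodard-lehman", "Woodard-Lehman, Derek"),
--     ("wright", "Wright, N.T."),
--     ("zagzeski", "Zagzeski, Linda"),
-- ]
--
--
-- def identify_figure(text, title, path):
--     for hay in (path.lower(), f"{title} {text[:500]}".lower()):
--         for kw, fig in _KEYWORDS: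
--             if kw in hay:
--                 return fig
--     return "Other"
-- ===== Notes on version B (the rewrite author's own statement) =====
-- stated objective: faster
-- what changed: Replaces the nested figure/alias substring search by a 20-entry surname-keyword scan, correct because every alias of a figure contains its lowercased surname and the bare surname is itself an alias, so alias matching reduces to surname matching.
import Mathlib
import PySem

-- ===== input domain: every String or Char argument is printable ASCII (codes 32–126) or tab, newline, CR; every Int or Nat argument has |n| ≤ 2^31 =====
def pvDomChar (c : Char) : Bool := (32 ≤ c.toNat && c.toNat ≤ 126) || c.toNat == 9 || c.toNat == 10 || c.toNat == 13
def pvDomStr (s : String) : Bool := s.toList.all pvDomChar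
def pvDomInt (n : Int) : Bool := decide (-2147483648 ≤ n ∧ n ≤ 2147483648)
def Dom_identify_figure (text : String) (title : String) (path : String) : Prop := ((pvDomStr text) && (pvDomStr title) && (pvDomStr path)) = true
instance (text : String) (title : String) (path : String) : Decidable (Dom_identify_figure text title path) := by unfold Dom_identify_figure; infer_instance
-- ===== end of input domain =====

-- B collapses A's nested alias search to a 20-surname-keyword scan (every alias contains the
-- surname and the bare surname is itself an alias); objective: faster by constant factor.
-- Equal return value proved on all inputs.

-- ===== PORT A =====
def KEY_FIGURES : List String := ["Hooker, Richard", "Hauerwas, Stanley", "Barth, Karl", "Augustine", "Balthasar, Hans Urs von", "Cary, Philip", "Lake, Peter", "Luther, Martin", "McIntosh, Mark", "Milbank, John", "Ockham, William", "Porter, Jean", "Shuger, Debora", "Tillich, Paul", "Webster, John", "Wells, Sam", "Williams, Rowan", "Woodard-Lehman, Derek", "Wright, N.T.", "Zagzeski, Linda"]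

def NAME_VARIANTS : PySem.Dict String (List String) := PySem.Dict.ofList
  [("Hooker, Richard", ["Richard Hooker", "Hooker", "Hooker Richard"]),
    ("Hauerwas, Stanley", ["Stanley Hauerwas", "Hauerwas", "Hauerwas Stanley"]),
    ("Barth, Karl", ["Karl Barth", "Barth", "Barth Karl"]),
    ("Augustine", ["St. Augustine", "Saint Augustine", "Augustine of Hippo"]),
    ("Balthasar, Hans Urs von", ["Hans Urs von Balthasar", "von Balthasar", "Balthasar", "Balthasar Hans Urs von"]),
    ("Cary, Philip", ["Philip Cary", "Cary", "Cary Philip"]),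
    ("Lake, Peter", ["Peter Lake", "Lake", "Lake Peter"]),
    ("Luther, Martin", ["Martin Luther", "Luther", "Luther Martin"]),
    ("McIntosh, Mark", ["Mark McIntosh", "McIntosh", "McIntosh Mark"]),
    ("Milbank, John", ["John Milbank", "Milbank", "Milbank John"]),
    ("Ockham, William", ["William Ockham", "William of Ockham", "Ockham", "Ockham William"]),
    ("Porter, Jean", ["Jean Porter", "Porter", "Porter Jean"]),
    ("Shuger, Debora", ["Debora Shuger", "Debora K. Shuger", "Shuger", "Shuger Debora"]),
    ("Tillich, Paul", ["Paul Tillich", "Tillich", "Tillich Paul"]),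
    ("Webster, John", ["John Webster", "Webster", "Webster John"]),
    ("Wells, Sam", ["Samuel Wells", "Sam Wells", "Wells", "Wells Sam"]),
    ("Williams, Rowan", ["Rowan Williams", "Williams", "Williams Rowan"]),
    ("Woodard-Lehman, Derek", ["Derek Woodard-Lehman", "Woodard-Lehman", "Woodard-Lehman Derek"]),
    ("Wright, N.T.", ["N.T. Wright", "N. T. Wright", "Nicholas Thomas Wright", "Tom Wright", "Wright", "Wright N.T."]),
    ("Zagzeski, Linda", ["Linda Zagzeski", "Zagzeski", "Zagzeski Linda"])]

-- inner 'for variant in NAME_VARIANTS[figure]' loop: does some variant occur in the haystack?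
def variantHit : List String → List Char → Bool
  | [], _ => false
  | v :: rest, hay =>
    if PySem.Chars.isIn (PySem.Chars.lower v.toList) hay then true else variantHit rest hay

-- the 'for figure in KEY_FIGURES' loop shared by identify_figure_from_path and the content pass
def figScan : List String → List Char → Option String
  | [], _ => none
  | f :: rest, hay =>
    if PySem.Chars.isIn (PySem.Chars.lower f.toList) hay then some f
    else
      match NAME_VARIANTS.get? f with      -- 'if figure in NAME_VARIANTS' + NAME_VARIANTS[figure]
      | some vs => if variantHit vs hay then some f else figScan rest hay
      | none => figScan rest hay

def identify_figure_from_path (path : String) : Option String :=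
  figScan KEY_FIGURES (PySem.Chars.lower path.toList)

def identify_figure (text : String) (title : String) (path : String) : String :=
  match identify_figure_from_path path with
  | some f => f
  | none =>
    -- search_text = f"{title} {text[:500]}".lower()
    match figScan KEY_FIGURES (PySem.Chars.lower (title.toList ++ ' ' :: PySem.List.slice text.toList none (some 500))) with
    | some f => f
    | none => "Other"

-- ===== PORT B =====
-- 20 surname keywords (already lowercase), each standing for one figure
def KEYWORDS : List (String × String) :=
  [("hooker", "Hooker, Richard"), ("hauerwas", "Hauerwas, Stanley"), ("barth", "Barth, Karl"),
   ("augustine", "Augustine"), ("balthasar", "Balthasar, Hans Urs von"), ("cary", "Cary, Philip"),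
   ("lake", "Lake, Peter"), ("luther", "Luther, Martin"), ("mcintosh", "McIntosh, Mark"),
   ("milbank", "Milbank, John"), ("ockham", "Ockham, William"), ("porter", "Porter, Jean"),
   ("shuger", "Shuger, Debora"), ("tillich", "Tillich, Paul"), ("webster", "Webster, John"),
   ("wells", "Wells, Sam"), ("williams", "Williams, Rowan"), ("woodard-lehman", "Woodard-Lehman, Derek"),
   ("wright", "Wright, N.T."), ("zagzeski", "Zagzeski, Linda")]

-- inner 'for kw, fig in _KEYWORDS' loop
def kwScan : List (String × String) → List Char → Option String
  | [], _ => none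
  | (kw, fig) :: rest, hay =>
    if PySem.Chars.isIn kw.toList hay then some fig else kwScan rest hay

-- outer 'for hay in (path.lower(), content.lower())' loop
def haysScan : List (List Char) → Option String
  | [] => none
  | hay :: rest =>
    match kwScan KEYWORDS hay with
    | some fig => some fig
    | none => haysScan rest

def identify_figure_alt (text : String) (title : String) (path : String) : String :=
  (haysScan [PySem.Chars.lower path.toList,
             PySem.Chars.lower (title.toList ++ ' ' :: PySem.List.slice text.toList none (some 500))]).getD "Other"

-- ===== PRECONDITION & SPEC =====
def Spec_identify_figure (text : String) (title : String) (path : String) (out : String) : Prop := out = identify_figure_alt text title path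
instance (text : String) (title : String) (path : String) (out : String) : Decidable (Spec_identify_figure text title path out) := by unfold Spec_identify_figure; infer_instance

-- ===== CLAIM (what is proved, stated in full; the proofs are below) =====
def Claim_equal_identify_figure : Prop := ∀ (text : String) (title : String) (path : String), Dom_identify_figure text title path → Spec_identify_figure text title path (identify_figure text title path)

-- ===== LEMMAS AND PROOFS =====

lemma variantHit_iff (vs : List String) (hay : List Char) :
    variantHit vs hay = true ↔ ∃ v ∈ vs, PySem.Chars.isIn (PySem.Chars.lower v.toList) hay = true := by
  induction vs with
  | nil => simp [variantHit]
  | cons v rest ih =>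
    by_cases h : PySem.Chars.isIn (PySem.Chars.lower v.toList) hay = true
    · simp [variantHit, h]
    · simp [variantHit, h, ih]

-- one figure's A-side hit test (main name or some alias occurs) equals the surname-keyword test,
-- given that the keyword is a substring of every pattern and is itself one of the patterns
lemma figHit_iff (f kw : String) (hay : List Char)
    (h1 : kw.toList <:+: PySem.Chars.lower f.toList)
    (h2 : ∀ v ∈ NAME_VARIANTS.getD f [], kw.toList <:+: PySem.Chars.lower v.toList)
    (h3 : kw.toList = PySem.Chars.lower f.toList ∨
          ∃ v ∈ NAME_VARIANTS.getD f [], kw.toList = PySem.Chars.lower v.toList) :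
    (PySem.Chars.isIn (PySem.Chars.lower f.toList) hay || variantHit (NAME_VARIANTS.getD f []) hay)
      = PySem.Chars.isIn kw.toList hay := by
  apply Bool.eq_iff_iff.mpr
  simp only [Bool.or_eq_true, PySem.Chars.isIn_iff_infix, variantHit_iff]
  constructor
  · rintro (hm | ⟨v, hv, hvin⟩)
    · exact h1.trans hm
    · exact (h2 v hv).trans hvin
  · intro hkw
    rcases h3 with h | ⟨v, hv, he⟩
    · exact Or.inl (h ▸ hkw)
    · exact Or.inr ⟨v, hv, he ▸ hkw⟩

-- figScan step rewritten as a single boolean hit test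
lemma figScan_cons (f : String) (rest : List String) (hay : List Char) :
    figScan (f :: rest) hay =
      if (PySem.Chars.isIn (PySem.Chars.lower f.toList) hay || variantHit (NAME_VARIANTS.getD f []) hay)
      then some f else figScan rest hay := by
  rw [figScan]
  cases hg : NAME_VARIANTS.get? f with
  | none => simp [PySem.Dict.getD, hg, variantHit]
  | some vs =>
    simp only [PySem.Dict.getD, hg, Option.getD_some]
    by_cases hm : PySem.Chars.isIn (PySem.Chars.lower f.toList) hay = true
    · simp [hm]
    · simp [hm]

-- A's nested scan equals B's keyword scan
lemma figScan_eq_kwScan (hay : List Char) :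
    figScan KEY_FIGURES hay = kwScan KEYWORDS hay := by
  simp only [KEY_FIGURES, KEYWORDS, figScan_cons, kwScan]
  rw [figHit_iff "Hooker, Richard" "hooker" hay (by decide) (by decide) (by decide),
      figHit_iff "Hauerwas, Stanley" "hauerwas" hay (by decide) (by decide) (by decide),
      figHit_iff "Barth, Karl" "barth" hay (by decide) (by decide) (by decide),
      figHit_iff "Augustine" "augustine" hay (by decide) (by decide) (by decide),
      figHit_iff "Balthasar, Hans Urs von" "balthasar" hay (by decide) (by decide) (by decide),
      figHit_iff "Cary, Philip" "cary" hay (by decide) (by decide) (by decide),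
      figHit_iff "Lake, Peter" "lake" hay (by decide) (by decide) (by decide),
      figHit_iff "Luther, Martin" "luther" hay (by decide) (by decide) (by decide),
      figHit_iff "McIntosh, Mark" "mcintosh" hay (by decide) (by decide) (by decide),
      figHit_iff "Milbank, John" "milbank" hay (by decide) (by decide) (by decide),
      figHit_iff "Ockham, William" "ockham" hay (by decide) (by decide) (by decide),
      figHit_iff "Porter, Jean" "porter" hay (by decide) (by decide) (by decide),
      figHit_iff "Shuger, Debora" "shuger" hay (by decide) (by decide) (by decide),
      figHit_iff "Tillich, Paul" "tillich" hay (by decide) (by decide) (by decide),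
      figHit_iff "Webster, John" "webster" hay (by decide) (by decide) (by decide),
      figHit_iff "Wells, Sam" "wells" hay (by decide) (by decide) (by decide),
      figHit_iff "Williams, Rowan" "williams" hay (by decide) (by decide) (by decide),
      figHit_iff "Woodard-Lehman, Derek" "woodard-lehman" hay (by decide) (by decide) (by decide),
      figHit_iff "Wright, N.T." "wright" hay (by decide) (by decide) (by decide),
      figHit_iff "Zagzeski, Linda" "zagzeski" hay (by decide) (by decide) (by decide)]
  rfl

-- ===== VERDICT (by name: the statement is the Claim_ definition above) =====
theorem identify_figure_spec : Claim_equal_identify_figure := by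
  intro text title path _
  unfold Spec_identify_figure identify_figure identify_figure_alt identify_figure_from_path
  rw [figScan_eq_kwScan, figScan_eq_kwScan]
  simp only [haysScan]
  cases kwScan KEYWORDS (PySem.Chars.lower path.toList) with
  | some f => rfl
  | none =>
    cases kwScan KEYWORDS (PySem.Chars.lower (title.toList ++ ' ' :: PySem.List.slice text.toList none (some 500))) with
    | some f => rfl
    | none => rfl
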